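-- pv_equiv track=rewrite | github.com/Sangil-Lee/Work | siteApps/fastProtect-1-0/opi/fps_overview_gen.py | output_subst
-- ===== SOURCE A (Python) =====
-- x_start = 18
--
-- x_spacing_out = 48
--
-- y_start_out = 54
--
-- def output_subst(line, output):
--     # Calculate the position for the widget
--     x = x_start + output * x_spacing_out
--     y = y_start_out
--
--     Od = "%02d" % (output)
--     val = 1<<output
--
--     vals = {"$Od": Od, "$Val": val, "$x": str(x), "$y": str(y)}
--
--     for macro in vals.keys():
--         line = line.replace(str(macro), str(vals[macro]))
--
--     return line
-- ===== SOURCE B (Python) =====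
-- x_start = 18
--
-- x_spacing_out = 48
--
-- y_start_out = 54
--
--
-- def output_subst(line, output):
--     # Same positions and macro values as before.
--     x = x_start + output * x_spacing_out
--     y = y_start_out
--
--     Od = "%02d" % (output)
--     val = 1 << output
--
--     vals = {"$Od": Od, "$Val": str(val), "$x": str(x), "$y": str(y)}
--
--     # Single left-to-right pass: at each position substitute the first
--     # matching macro (all start with '$'), instead of four sequential scans.
--     out = []
--     i = 0
--     n = len(line)
--     while i < n:
--         c = line[i]
--         if c == "$":
--             for k, v in vals.items():
--                 if line.startswith(k, i):
--                     out.append(v)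
--                     i += len(k)
--                     break
--             else:
--                 out.append(c)
--                 i += 1
--         else:
--             out.append(c)
--             i += 1
--     return "".join(out)
-- ===== Notes on version B (the rewrite author's own statement) =====
-- stated objective: alternative
-- what changed: B replaces the four sequential line.replace passes by one left-to-right scan that substitutes the first matching macro at each position (possible because all macro keys start with '$' and their values contain no '$'); Pre_ excludes output < 0, where A raises ValueError at 1<<output.
import Mathlib
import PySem

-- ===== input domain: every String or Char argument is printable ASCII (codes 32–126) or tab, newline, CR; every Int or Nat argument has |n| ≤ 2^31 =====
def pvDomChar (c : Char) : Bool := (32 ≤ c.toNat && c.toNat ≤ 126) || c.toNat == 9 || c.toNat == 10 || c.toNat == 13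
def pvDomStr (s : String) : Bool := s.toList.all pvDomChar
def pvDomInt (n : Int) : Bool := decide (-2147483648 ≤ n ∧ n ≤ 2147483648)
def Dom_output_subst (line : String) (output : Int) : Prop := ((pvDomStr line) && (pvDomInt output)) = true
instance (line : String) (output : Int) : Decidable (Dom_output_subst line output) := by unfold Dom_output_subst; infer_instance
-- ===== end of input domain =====

-- B replaces the four sequential line.replace passes of A by one left-to-right scan that
-- substitutes the first matching macro at each position (alternative decomposition, same cost class).

-- ===== PORT A =====
-- literal port of A: sequential line.replace for each macro of the dict, in insertion order
def output_subst (line : String) (output : Int) : String :=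
  let x : Int := 18 + output * 48          -- x_start + output * x_spacing_out
  let y : Int := 54                        -- y_start_out
  -- "%02d" % output = str(output).zfill(2) (zero-pad to width 2, sign kept in front; exact for every int)
  let od : String := String.ofList (PySem.Chars.zfill (PySem.Int.toChars output) 2)
  let val : Int := (1 : Int) <<< output.toNat   -- 1 << output; Python raises on output < 0 (Pre_)
  -- dict {"$Od": Od, "$Val": val, "$x": str(x), "$y": str(y)}; str() of the int value
  -- is applied here once (the loop's str(vals[macro]) is identity on the str entries)
  let vals : PySem.Dict String String :=
    ((((PySem.Dict.empty.insert "$Od" od).insert "$Val" (PySem.Int.toStr val)).insert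
        "$x" (PySem.Int.toStr x)).insert "$y" (PySem.Int.toStr y))
  vals.items.foldl (fun ln kv => PySem.Str.replace ln kv.1 kv.2) line

-- ===== PORT B =====
-- Source B's single pass: at each position, if the char is '$' try the macros in dict order,
-- substitute the first whose key starts here and jump over it, else copy the char.
def pvScanB (vals : List (List Char × List Char)) : List Char → List Char
  | [] => []
  | c :: t =>
    if c = '$' then
      match vals.find? (fun kv => kv.1.isPrefixOf (c :: t)) with
      | some kv => kv.2 ++ pvScanB vals (t.drop (kv.1.length - 1))
      | none => c :: pvScanB vals t
    else c :: pvScanB vals t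
termination_by l => l.length
decreasing_by
  · simp only [List.length_cons, List.length_drop]; omega
  · simp
  · simp

def output_subst_alt (line : String) (output : Int) : String :=
  let x : Int := 18 + output * 48
  let y : Int := 54
  let od : List Char := PySem.Chars.zfill (PySem.Int.toChars output) 2   -- "%02d" % output
  let val : Int := (1 : Int) <<< output.toNat
  let vals : List (List Char × List Char) :=
    [("$Od".toList, od), ("$Val".toList, PySem.Int.toChars val),
     ("$x".toList, PySem.Int.toChars x), ("$y".toList, PySem.Int.toChars y)]
  String.ofList (pvScanB vals line.toList)

-- ===== PRECONDITION & SPEC =====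
-- Pre_ excludes output < 0: there A raises ValueError at 1 << output ("negative shift count"), and B raises the same way.
def Pre_output_subst (line : String) (output : Int) : Prop := 0 ≤ output
instance (line : String) (output : Int) : Decidable (Pre_output_subst line output) := by
  unfold Pre_output_subst; infer_instance
def pvWitness_output_subst : String × Int := ("w=$x h=$y n=$Od v=$Val", 3)

def Spec_output_subst (line : String) (output : Int) (out : String) : Prop := out = output_subst_alt line output
instance (line : String) (output : Int) (out : String) : Decidable (Spec_output_subst line output out) := by
  unfold Spec_output_subst; infer_instance

-- ===== CLAIM (what is proved, stated in full; the proofs are below) =====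
def Claim_equal_output_subst : Prop := ∀ (line : String) (output : Int), Dom_output_subst line output → Pre_output_subst line output → Spec_output_subst line output (output_subst line output)

-- ===== LEMMAS AND PROOFS =====

-- accumulator law for the replace scanner
theorem pvGo_acc (old new : List Char) : ∀ (fuel : Nat) (l acc : List Char),
    PySem.Chars.replace.go old new fuel l acc
      = acc.reverse ++ PySem.Chars.replace.go old new fuel l [] := by
  intro fuel
  induction fuel with
  | zero => intro l acc; simp [PySem.Chars.replace.go]
  | succ n ih =>
    intro l acc
    cases l with
    | nil => simp [PySem.Chars.replace.go]
    | cons c t =>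
      by_cases h : old.isPrefixOf (c :: t)
      · simp only [PySem.Chars.replace.go, h, if_true]
        rw [ih _ (new.reverse ++ acc), ih _ (new.reverse ++ [])]
        simp
      · simp only [PySem.Chars.replace.go, h]
        rw [if_neg (by simp [h]), if_neg (by simp [h])]
        rw [ih _ (c :: acc), ih _ (c :: [])]
        simp

-- with enough fuel the scanner's result does not depend on the fuel
theorem pvGo_fuel (old new : List Char) (hold : old ≠ []) :
    ∀ (fuel fuel' : Nat) (l acc : List Char), l.length ≤ fuel → l.length ≤ fuel' →
      PySem.Chars.replace.go old new fuel l acc = PySem.Chars.replace.go old new fuel' l acc := by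
  intro fuel
  induction fuel with
  | zero =>
    intro fuel' l acc h h'
    have : l = [] := List.length_eq_zero_iff.mp (Nat.le_zero.mp h)
    subst this
    cases fuel' <;> simp [PySem.Chars.replace.go]
  | succ n ih =>
    intro fuel' l acc h h'
    cases l with
    | nil => cases fuel' <;> simp [PySem.Chars.replace.go]
    | cons c t =>
      cases fuel' with
      | zero => simp at h'
      | succ m =>
        have hol : 1 ≤ old.length := by
          cases old with
          | nil => exact absurd rfl hold
          | cons _ _ => simp
        by_cases hp : old.isPrefixOf (c :: t)
        · simp only [PySem.Chars.replace.go, hp, if_true]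
          apply ih
          · simp only [List.length_drop, List.length_cons] at *
            omega
          · simp only [List.length_drop, List.length_cons] at *
            omega
        · simp only [PySem.Chars.replace.go, hp]
          rw [if_neg (by simp [hp]), if_neg (by simp [hp])]
          apply ih <;> simp_all

theorem pvReplace_nil (old new : List Char) (h : old ≠ []) :
    PySem.Chars.replace [] old new = [] := by
  simp [PySem.Chars.replace, PySem.Chars.replace.go, List.isEmpty_iff, h]

theorem pvReplace_cons_not_prefix (old new : List Char) (c : Char) (t : List Char)
    (h : old ≠ []) (hp : old.isPrefixOf (c :: t) = false) :
    PySem.Chars.replace (c :: t) old new = c :: PySem.Chars.replace t old new := by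
  rw [PySem.Chars.replace, if_neg (by simp [List.isEmpty_iff, h])]
  rw [PySem.Chars.replace, if_neg (by simp [List.isEmpty_iff, h])]
  show PySem.Chars.replace.go old new (t.length + 1) (c :: t) [] = _
  simp only [PySem.Chars.replace.go, hp, Bool.false_eq_true, if_false]
  rw [pvGo_acc]
  rfl

theorem pvReplace_prefix_append (old new t : List Char) (h : old ≠ []) :
    PySem.Chars.replace (old ++ t) old new = new ++ PySem.Chars.replace t old new := by
  obtain ⟨o, os, rfl⟩ : ∃ o os, old = o :: os := by
    cases old with
    | nil => exact absurd rfl h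
    | cons o os => exact ⟨o, os, rfl⟩
  rw [PySem.Chars.replace, if_neg (by simp)]
  rw [PySem.Chars.replace, if_neg (by simp)]
  show PySem.Chars.replace.go (o :: os) new ((os ++ t).length + 1) (o :: (os ++ t)) [] = _
  have hpre : (o :: os).isPrefixOf (o :: os ++ t) = true :=
    List.isPrefixOf_iff_prefix.mpr (List.prefix_append _ _)
  simp only [PySem.Chars.replace.go, List.cons_append, hpre]
  have hdrop : List.drop (o :: os).length (o :: (os ++ t)) = t := by
    simpa using List.drop_left (l₁ := o :: os) (l₂ := t)
  rw [show (o :: (os ++ t) : List Char) = o :: os ++ t from rfl] at hdrop ⊢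
  rw [hdrop]
  rw [pvGo_fuel (o :: os) new (by simp) ((os ++ t).length) (t.length) t _ (by simp) (by simp)]
  rw [pvGo_acc]
  simp

theorem pvReplace_append_no_dollar (os new a b : List Char) (ha : '$' ∉ a) :
    PySem.Chars.replace (a ++ b) ('$' :: os) new = a ++ PySem.Chars.replace b ('$' :: os) new := by
  induction a with
  | nil => simp
  | cons c a' ih =>
    have hc : c ≠ '$' := by intro hc; exact ha (hc ▸ List.mem_cons_self)
    have hp : ('$' :: os).isPrefixOf (c :: (a' ++ b)) = false := by
      simp [List.isPrefixOf]
      intro hcc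
      exact absurd hcc.symm hc
    rw [List.cons_append, pvReplace_cons_not_prefix _ _ _ _ (by simp) hp,
      ih (fun hm => ha (List.mem_cons_of_mem _ hm))]
    simp

-- a pattern of non-digit chars that prefixes the output of a digit-valued replace
-- already prefixed its input
theorem pvPrefix_transfer (old new : List Char) (hold : old ≠ []) (hnew0 : new ≠ [])
    (hnew : ∀ c ∈ new, c.isDigit = true) :
    ∀ (n : Nat) (p t : List Char), (∀ c ∈ p, c.isDigit = false) → t.length ≤ n →
      p <+: PySem.Chars.replace t old new → p <+: t := by
  intro n
  induction n with
  | zero =>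
    intro p t hp ht hpre
    have : t = [] := List.length_eq_zero_iff.mp (Nat.le_zero.mp ht)
    subst this
    rwa [pvReplace_nil _ _ hold] at hpre
  | succ n ih =>
    intro p t hp ht hpre
    cases p with
    | nil => exact List.nil_prefix
    | cons q p2 =>
      obtain ⟨d, nd, rfl⟩ : ∃ d nd, new = d :: nd := by
        cases new with
        | nil => exact absurd rfl hnew0
        | cons d nd => exact ⟨d, nd, rfl⟩
      by_cases hk : old.isPrefixOf t = true
      · obtain ⟨t2, ht2⟩ := List.isPrefixOf_iff_prefix.mp hk
        rw [← ht2, pvReplace_prefix_append _ _ _ hold] at hpre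
        rcases List.cons_prefix_cons.mp hpre with ⟨heq, -⟩
        have hq := hp q List.mem_cons_self
        have hd := hnew d List.mem_cons_self
        rw [heq, hd] at hq
        exact absurd hq (by simp)
      · cases t with
        | nil => rw [pvReplace_nil _ _ hold] at hpre; simp at hpre
        | cons c t2 =>
          rw [pvReplace_cons_not_prefix old (d :: nd) c t2 hold (Bool.eq_false_iff.mpr hk)] at hpre
          rcases List.cons_prefix_cons.mp hpre with ⟨rfl, hp2⟩
          refine List.cons_prefix_cons.mpr ⟨rfl, ?_⟩
          exact ih p2 t2 (fun c hc => hp c (List.mem_cons_of_mem _ hc))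
            (by simp at ht; omega) hp2

-- the digit shape of the macro values
theorem pvDigits_toChars (n : Int) (hn : 0 ≤ n) :
    PySem.Int.toChars n ≠ [] ∧ ∀ c ∈ PySem.Int.toChars n, c.isDigit = true := by
  unfold PySem.Int.toChars
  rw [if_neg (by omega)]
  refine ⟨?_, ?_⟩
  · have := Nat.length_toDigits_pos (b := 10) (n := n.toNat)
    intro h
    rw [h] at this
    simp at this
  · intro c hc
    exact Nat.isDigit_of_mem_toDigits (by norm_num) (by norm_num) hc

theorem pvDigits_zfill (cs : List Char) (h0 : cs ≠ []) (h : ∀ c ∈ cs, c.isDigit = true) :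
    PySem.Chars.zfill cs 2 ≠ [] ∧ ∀ c ∈ PySem.Chars.zfill cs 2, c.isDigit = true := by
  cases cs with
  | nil => exact absurd rfl h0
  | cons c rest =>
    by_cases hlen : (2 : Int) ≤ (c :: rest).length
    · have hz : PySem.Chars.zfill (c :: rest) 2 = c :: rest := by
        unfold PySem.Chars.zfill
        rw [if_pos hlen]
      rw [hz]
      exact ⟨h0, h⟩
    · have hsign : ¬ (c = '+' ∨ c = '-') := by
        rintro (rfl | rfl)
        · have := h '+' List.mem_cons_self; simp at this
        · have := h '-' List.mem_cons_self; simp at this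
      have hz : PySem.Chars.zfill (c :: rest) 2
          = List.replicate ((2 : Int).toNat - (c :: rest).length) '0' ++ (c :: rest) := by
        unfold PySem.Chars.zfill
        rw [if_neg hlen]
        exact if_neg hsign
      rw [hz]
      refine ⟨by simp, ?_⟩
      intro d hd
      rcases List.mem_append.mp hd with h1 | h1
      · rw [List.eq_of_mem_replicate h1]; rfl
      · exact h d h1

-- the macro keys' letters are not digits
theorem pvNonDigit_Val : ∀ c ∈ (['V','a','l'] : List Char), c.isDigit = false := by
  intro c hc
  rcases List.mem_cons.mp hc with rfl | hc
  · rfl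
  rcases List.mem_cons.mp hc with rfl | hc
  · rfl
  rcases List.mem_cons.mp hc with rfl | hc
  · rfl
  · simp at hc

theorem pvNonDigit_x : ∀ c ∈ (['x'] : List Char), c.isDigit = false := by
  intro c hc
  rcases List.mem_cons.mp hc with rfl | hc
  · rfl
  · simp at hc

theorem pvNonDigit_y : ∀ c ∈ (['y'] : List Char), c.isDigit = false := by
  intro c hc
  rcases List.mem_cons.mp hc with rfl | hc
  · rfl
  · simp at hc

-- the heart: four sequential replaces = one simultaneous scan, for these four keys
-- and any nonempty digit-only replacement values
set_option maxRecDepth 8192 in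
theorem pvMain (vO vV vX vY : List Char)
    (hO0 : vO ≠ []) (hO : ∀ c ∈ vO, c.isDigit = true)
    (hV0 : vV ≠ []) (hV : ∀ c ∈ vV, c.isDigit = true)
    (hX0 : vX ≠ []) (hX : ∀ c ∈ vX, c.isDigit = true) :
    ∀ (n : Nat) (l : List Char), l.length ≤ n →
      PySem.Chars.replace (PySem.Chars.replace (PySem.Chars.replace
          (PySem.Chars.replace l ['$','O','d'] vO) ['$','V','a','l'] vV) ['$','x'] vX) ['$','y'] vY
        = pvScanB [(['$','O','d'], vO), (['$','V','a','l'], vV), (['$','x'], vX), (['$','y'], vY)] l := by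
  have hO' : '$' ∉ vO := fun hm => absurd (hO '$' hm) (by simp)
  have hV' : '$' ∉ vV := fun hm => absurd (hV '$' hm) (by simp)
  have hX' : '$' ∉ vX := fun hm => absurd (hX '$' hm) (by simp)
  intro n
  induction n with
  | zero =>
    intro l hl
    have : l = [] := List.length_eq_zero_iff.mp (Nat.le_zero.mp hl)
    subst this
    simp [pvReplace_nil, pvScanB]
  | succ n ih =>
    intro l hl
    cases l with
    | nil => simp [pvReplace_nil, pvScanB]
    | cons c t =>
      by_cases hc : c = '$'
      · subst hc
        by_cases h1 : (['$','O','d'] : List Char).isPrefixOf ('$' :: t) = true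
        · -- "$Od" starts here
          obtain ⟨t', ht⟩ := List.isPrefixOf_iff_prefix.mp h1
          have hlen : t'.length ≤ n := by
            have h3 := congrArg List.length ht
            simp at h3 hl
            omega
          rw [← ht]
          rw [pvReplace_prefix_append ['$','O','d'] vO t' (by simp)]
          rw [pvReplace_append_no_dollar ['V','a','l'] vV vO _ hO']
          rw [pvReplace_append_no_dollar ['x'] vX vO _ hO']
          rw [pvReplace_append_no_dollar ['y'] vY vO _ hO']
          rw [ih t' hlen]
          show _ = pvScanB _ ('$' :: 'O' :: 'd' :: t')
          simp [pvScanB, List.find?, List.isPrefixOf]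
        · by_cases h2 : (['$','V','a','l'] : List Char).isPrefixOf ('$' :: t) = true
          · -- "$Val" starts here
            obtain ⟨t', ht⟩ := List.isPrefixOf_iff_prefix.mp h2
            have hlen : t'.length ≤ n := by
              have h3 := congrArg List.length ht
              simp at h3 hl
              omega
            rw [← ht]
            have s1 : PySem.Chars.replace (['$','V','a','l'] ++ t') ['$','O','d'] vO
                = ['$','V','a','l'] ++ PySem.Chars.replace t' ['$','O','d'] vO := by
              show PySem.Chars.replace ('$' :: 'V' :: 'a' :: 'l' :: t') _ _
                = '$' :: 'V' :: 'a' :: 'l' :: PySem.Chars.replace t' ['$','O','d'] vO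
              rw [pvReplace_cons_not_prefix ['$','O','d'] vO '$' ('V' :: 'a' :: 'l' :: t')
                    (by simp) (by simp [List.isPrefixOf]),
                  pvReplace_cons_not_prefix ['$','O','d'] vO 'V' ('a' :: 'l' :: t')
                    (by simp) (by simp [List.isPrefixOf]),
                  pvReplace_cons_not_prefix ['$','O','d'] vO 'a' ('l' :: t')
                    (by simp) (by simp [List.isPrefixOf]),
                  pvReplace_cons_not_prefix ['$','O','d'] vO 'l' t'
                    (by simp) (by simp [List.isPrefixOf])]
            rw [s1]
            rw [pvReplace_prefix_append ['$','V','a','l'] vV _ (by simp)]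
            rw [pvReplace_append_no_dollar ['x'] vX vV _ hV']
            rw [pvReplace_append_no_dollar ['y'] vY vV _ hV']
            rw [ih t' hlen]
            show _ = pvScanB _ ('$' :: 'V' :: 'a' :: 'l' :: t')
            simp [pvScanB, List.find?, List.isPrefixOf]
          · by_cases h3 : (['$','x'] : List Char).isPrefixOf ('$' :: t) = true
            · -- "$x" starts here
              obtain ⟨t', ht⟩ := List.isPrefixOf_iff_prefix.mp h3
              have hlen : t'.length ≤ n := by
                have h4 := congrArg List.length ht
                simp at h4 hl
                omega
              rw [← ht]
              have s1 : PySem.Chars.replace (['$','x'] ++ t') ['$','O','d'] vO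
                  = '$' :: 'x' :: PySem.Chars.replace t' ['$','O','d'] vO := by
                show PySem.Chars.replace ('$' :: 'x' :: t') _ _ = _
                rw [pvReplace_cons_not_prefix ['$','O','d'] vO '$' ('x' :: t')
                      (by simp) (by simp [List.isPrefixOf]),
                    pvReplace_cons_not_prefix ['$','O','d'] vO 'x' t'
                      (by simp) (by simp [List.isPrefixOf])]
              have s2 : PySem.Chars.replace
                    ('$' :: 'x' :: PySem.Chars.replace t' ['$','O','d'] vO) ['$','V','a','l'] vV
                  = '$' :: 'x' :: PySem.Chars.replace (PySem.Chars.replace t' ['$','O','d'] vO)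
                      ['$','V','a','l'] vV := by
                rw [pvReplace_cons_not_prefix ['$','V','a','l'] vV '$'
                      ('x' :: PySem.Chars.replace t' ['$','O','d'] vO)
                      (by simp) (by simp [List.isPrefixOf]),
                    pvReplace_cons_not_prefix ['$','V','a','l'] vV 'x'
                      (PySem.Chars.replace t' ['$','O','d'] vO)
                      (by simp) (by simp [List.isPrefixOf])]
              rw [s1, s2]
              rw [show ('$' :: 'x' :: PySem.Chars.replace (PySem.Chars.replace t' ['$','O','d'] vO)
                      ['$','V','a','l'] vV)
                  = ['$','x'] ++ PySem.Chars.replace (PySem.Chars.replace t' ['$','O','d'] vO)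
                      ['$','V','a','l'] vV from rfl]
              rw [pvReplace_prefix_append ['$','x'] vX _ (by simp)]
              rw [pvReplace_append_no_dollar ['y'] vY vX _ hX']
              rw [ih t' hlen]
              show _ = pvScanB _ ('$' :: 'x' :: t')
              simp [pvScanB, List.find?, List.isPrefixOf]
            · by_cases h4 : (['$','y'] : List Char).isPrefixOf ('$' :: t) = true
              · -- "$y" starts here
                obtain ⟨t', ht⟩ := List.isPrefixOf_iff_prefix.mp h4
                have hlen : t'.length ≤ n := by
                  have h5 := congrArg List.length ht
                  simp at h5 hl
                  omega
                rw [← ht]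
                have s1 : PySem.Chars.replace (['$','y'] ++ t') ['$','O','d'] vO
                    = '$' :: 'y' :: PySem.Chars.replace t' ['$','O','d'] vO := by
                  show PySem.Chars.replace ('$' :: 'y' :: t') _ _ = _
                  rw [pvReplace_cons_not_prefix ['$','O','d'] vO '$' ('y' :: t')
                        (by simp) (by simp [List.isPrefixOf]),
                      pvReplace_cons_not_prefix ['$','O','d'] vO 'y' t'
                        (by simp) (by simp [List.isPrefixOf])]
                have s2 : PySem.Chars.replace
                      ('$' :: 'y' :: PySem.Chars.replace t' ['$','O','d'] vO) ['$','V','a','l'] vV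
                    = '$' :: 'y' :: PySem.Chars.replace (PySem.Chars.replace t' ['$','O','d'] vO)
                        ['$','V','a','l'] vV := by
                  rw [pvReplace_cons_not_prefix ['$','V','a','l'] vV '$'
                        ('y' :: PySem.Chars.replace t' ['$','O','d'] vO)
                        (by simp) (by simp [List.isPrefixOf]),
                      pvReplace_cons_not_prefix ['$','V','a','l'] vV 'y'
                        (PySem.Chars.replace t' ['$','O','d'] vO)
                        (by simp) (by simp [List.isPrefixOf])]
                have s3 : PySem.Chars.replace
                      ('$' :: 'y' :: PySem.Chars.replace (PySem.Chars.replace t' ['$','O','d'] vO)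
                        ['$','V','a','l'] vV) ['$','x'] vX
                    = '$' :: 'y' :: PySem.Chars.replace (PySem.Chars.replace
                        (PySem.Chars.replace t' ['$','O','d'] vO) ['$','V','a','l'] vV)
                        ['$','x'] vX := by
                  rw [pvReplace_cons_not_prefix ['$','x'] vX '$'
                        ('y' :: PySem.Chars.replace (PySem.Chars.replace t' ['$','O','d'] vO)
                          ['$','V','a','l'] vV)
                        (by simp) (by simp [List.isPrefixOf]),
                      pvReplace_cons_not_prefix ['$','x'] vX 'y'
                        (PySem.Chars.replace (PySem.Chars.replace t' ['$','O','d'] vO)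
                          ['$','V','a','l'] vV)
                        (by simp) (by simp [List.isPrefixOf])]
                rw [s1, s2, s3]
                rw [show ('$' :: 'y' :: PySem.Chars.replace (PySem.Chars.replace
                        (PySem.Chars.replace t' ['$','O','d'] vO) ['$','V','a','l'] vV)
                        ['$','x'] vX)
                    = ['$','y'] ++ PySem.Chars.replace (PySem.Chars.replace
                        (PySem.Chars.replace t' ['$','O','d'] vO) ['$','V','a','l'] vV)
                        ['$','x'] vX from rfl]
                rw [pvReplace_prefix_append ['$','y'] vY _ (by simp)]
                rw [ih t' hlen]
                show _ = pvScanB _ ('$' :: 'y' :: t')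
                simp [pvScanB, List.find?, List.isPrefixOf]
              · -- '$' followed by no macro key: every pass copies the '$'
                have hlen : t.length ≤ n := by simp at hl; omega
                have eh1 : (['$','O','d'] : List Char).isPrefixOf ('$' :: t) = false := by
                  exact Bool.eq_false_iff.mpr h1
                have eh2 : (['$','V','a','l'] : List Char).isPrefixOf ('$' :: t) = false := by
                  exact Bool.eq_false_iff.mpr h2
                have eh3 : (['$','x'] : List Char).isPrefixOf ('$' :: t) = false := by
                  exact Bool.eq_false_iff.mpr h3
                have eh4 : (['$','y'] : List Char).isPrefixOf ('$' :: t) = false := by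
                  exact Bool.eq_false_iff.mpr h4
                have hVt : ¬ (['V','a','l'] : List Char) <+: t := by
                  intro hpre
                  rw [show (['$','V','a','l'] : List Char).isPrefixOf ('$' :: t)
                      = (['V','a','l'] : List Char).isPrefixOf t by simp [List.isPrefixOf]] at eh2
                  rw [List.isPrefixOf_iff_prefix.mpr hpre] at eh2
                  simp at eh2
                have hxt : ¬ (['x'] : List Char) <+: t := by
                  intro hpre
                  rw [show (['$','x'] : List Char).isPrefixOf ('$' :: t)
                      = (['x'] : List Char).isPrefixOf t by simp [List.isPrefixOf]] at eh3
                  rw [List.isPrefixOf_iff_prefix.mpr hpre] at eh3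
                  simp at eh3
                have hyt : ¬ (['y'] : List Char) <+: t := by
                  intro hpre
                  rw [show (['$','y'] : List Char).isPrefixOf ('$' :: t)
                      = (['y'] : List Char).isPrefixOf t by simp [List.isPrefixOf]] at eh4
                  rw [List.isPrefixOf_iff_prefix.mpr hpre] at eh4
                  simp at eh4
                -- the later passes see digit text where the keys' letters cannot appear
                have tr1 : ∀ p : List Char, (∀ c ∈ p, c.isDigit = false) →
                    p <+: PySem.Chars.replace t ['$','O','d'] vO → p <+: t :=
                  fun p hp => pvPrefix_transfer ['$','O','d'] vO (by simp) hO0 hO _ p t hp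
                    (Nat.le_refl _)
                have tr2 : ∀ p : List Char, (∀ c ∈ p, c.isDigit = false) →
                    p <+: PySem.Chars.replace (PySem.Chars.replace t ['$','O','d'] vO)
                      ['$','V','a','l'] vV →
                    p <+: PySem.Chars.replace t ['$','O','d'] vO :=
                  fun p hp => pvPrefix_transfer ['$','V','a','l'] vV (by simp) hV0 hV _ p _ hp
                    (Nat.le_refl _)
                have tr3 : ∀ p : List Char, (∀ c ∈ p, c.isDigit = false) →
                    p <+: PySem.Chars.replace (PySem.Chars.replace (PySem.Chars.replace t
                      ['$','O','d'] vO) ['$','V','a','l'] vV) ['$','x'] vX →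
                    p <+: PySem.Chars.replace (PySem.Chars.replace t ['$','O','d'] vO)
                      ['$','V','a','l'] vV :=
                  fun p hp => pvPrefix_transfer ['$','x'] vX (by simp) hX0 hX _ p _ hp
                    (Nat.le_refl _)
                have e2 : (['$','V','a','l'] : List Char).isPrefixOf
                    ('$' :: PySem.Chars.replace t ['$','O','d'] vO) = false := by
                  rw [show (['$','V','a','l'] : List Char).isPrefixOf
                        ('$' :: PySem.Chars.replace t ['$','O','d'] vO)
                      = (['V','a','l'] : List Char).isPrefixOf
                        (PySem.Chars.replace t ['$','O','d'] vO) by simp [List.isPrefixOf]]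
                  rw [Bool.eq_false_iff]
                  intro hpre
                  exact hVt (tr1 ['V','a','l'] pvNonDigit_Val (List.isPrefixOf_iff_prefix.mp hpre))
                have e3 : (['$','x'] : List Char).isPrefixOf
                    ('$' :: PySem.Chars.replace (PySem.Chars.replace t ['$','O','d'] vO)
                      ['$','V','a','l'] vV) = false := by
                  rw [show (['$','x'] : List Char).isPrefixOf
                        ('$' :: PySem.Chars.replace (PySem.Chars.replace t ['$','O','d'] vO)
                          ['$','V','a','l'] vV)
                      = (['x'] : List Char).isPrefixOf
                        (PySem.Chars.replace (PySem.Chars.replace t ['$','O','d'] vO)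
                          ['$','V','a','l'] vV) by simp [List.isPrefixOf]]
                  rw [Bool.eq_false_iff]
                  intro hpre
                  exact hxt (tr1 ['x'] pvNonDigit_x (tr2 ['x'] pvNonDigit_x
                    (List.isPrefixOf_iff_prefix.mp hpre)))
                have e4 : (['$','y'] : List Char).isPrefixOf
                    ('$' :: PySem.Chars.replace (PySem.Chars.replace (PySem.Chars.replace t
                      ['$','O','d'] vO) ['$','V','a','l'] vV) ['$','x'] vX) = false := by
                  rw [show (['$','y'] : List Char).isPrefixOf
                        ('$' :: PySem.Chars.replace (PySem.Chars.replace (PySem.Chars.replace t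
                          ['$','O','d'] vO) ['$','V','a','l'] vV) ['$','x'] vX)
                      = (['y'] : List Char).isPrefixOf
                        (PySem.Chars.replace (PySem.Chars.replace (PySem.Chars.replace t
                          ['$','O','d'] vO) ['$','V','a','l'] vV) ['$','x'] vX)
                        by simp [List.isPrefixOf]]
                  rw [Bool.eq_false_iff]
                  intro hpre
                  exact hyt (tr1 ['y'] pvNonDigit_y (tr2 ['y'] pvNonDigit_y (tr3 ['y'] pvNonDigit_y
                    (List.isPrefixOf_iff_prefix.mp hpre))))
                rw [pvReplace_cons_not_prefix ['$','O','d'] vO '$' t (by simp) eh1]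
                rw [pvReplace_cons_not_prefix ['$','V','a','l'] vV '$'
                      (PySem.Chars.replace t ['$','O','d'] vO) (by simp) e2]
                rw [pvReplace_cons_not_prefix ['$','x'] vX '$'
                      (PySem.Chars.replace (PySem.Chars.replace t ['$','O','d'] vO)
                        ['$','V','a','l'] vV) (by simp) e3]
                rw [pvReplace_cons_not_prefix ['$','y'] vY '$'
                      (PySem.Chars.replace (PySem.Chars.replace (PySem.Chars.replace t
                        ['$','O','d'] vO) ['$','V','a','l'] vV) ['$','x'] vX) (by simp) e4]
                rw [ih t hlen]
                show _ = pvScanB _ ('$' :: t)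
                simp [pvScanB, List.find?, eh1, eh2, eh3, eh4]
      · -- ordinary character: every pass and the scan just copy it
        have hlen : t.length ≤ n := by simp at hl; omega
        have hp : ∀ (os rest : List Char), ('$' :: os).isPrefixOf (c :: rest) = false := by
          intro os rest
          simp [List.isPrefixOf]
          intro h
          exact absurd h.symm hc
        rw [pvReplace_cons_not_prefix ['$','O','d'] vO c t (by simp) (hp _ _)]
        rw [pvReplace_cons_not_prefix ['$','V','a','l'] vV c _ (by simp) (hp _ _)]
        rw [pvReplace_cons_not_prefix ['$','x'] vX c _ (by simp) (hp _ _)]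
        rw [pvReplace_cons_not_prefix ['$','y'] vY c _ (by simp) (hp _ _)]
        rw [ih t hlen]
        simp [pvScanB, hc]

-- A's dict loop unfolded to the four sequential replaces
theorem pvA_unfold (line : String) (output : Int) :
    output_subst line output =
      PySem.Str.replace (PySem.Str.replace (PySem.Str.replace (PySem.Str.replace line
        "$Od" (String.ofList (PySem.Chars.zfill (PySem.Int.toChars output) 2)))
        "$Val" (PySem.Int.toStr ((1 : Int) <<< output.toNat)))
        "$x" (PySem.Int.toStr (18 + output * 48)))
        "$y" (PySem.Int.toStr 54) := by
  unfold output_subst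
  rfl

-- ===== VERDICT (by name: the statement is the Claim_ definition above) =====
theorem output_subst_spec : Claim_equal_output_subst := by
  intro line output _ hpre
  have hp0 : (0 : Int) ≤ output := hpre
  unfold Spec_output_subst
  rw [pvA_unfold]
  unfold output_subst_alt
  have hOdig := pvDigits_toChars output hp0
  have hOd := pvDigits_zfill _ hOdig.1 hOdig.2
  have hVv := pvDigits_toChars ((1 : Int) <<< output.toNat) (by
    rw [Int.shiftLeft_eq]; positivity)
  have hXv := pvDigits_toChars (18 + output * 48) (by omega)
  have hlist := pvMain (PySem.Chars.zfill (PySem.Int.toChars output) 2)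
    (PySem.Int.toChars ((1 : Int) <<< output.toNat)) (PySem.Int.toChars (18 + output * 48))
    (PySem.Int.toChars 54) hOd.1 hOd.2 hVv.1 hVv.2 hXv.1 hXv.2
    line.toList.length line.toList (Nat.le_refl _)
  have htl : (PySem.Str.replace (PySem.Str.replace (PySem.Str.replace (PySem.Str.replace line
        "$Od" (String.ofList (PySem.Chars.zfill (PySem.Int.toChars output) 2)))
        "$Val" (PySem.Int.toStr ((1 : Int) <<< output.toNat)))
        "$x" (PySem.Int.toStr (18 + output * 48)))
        "$y" (PySem.Int.toStr 54)).toList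
      = pvScanB [("$Od".toList, PySem.Chars.zfill (PySem.Int.toChars output) 2),
          ("$Val".toList, PySem.Int.toChars ((1 : Int) <<< output.toNat)),
          ("$x".toList, PySem.Int.toChars (18 + output * 48)),
          ("$y".toList, PySem.Int.toChars 54)] line.toList := by
    simp only [PySem.Str.toList_replace, PySem.Int.toList_toStr, String.toList_ofList]
    exact hlist
  calc PySem.Str.replace (PySem.Str.replace (PySem.Str.replace (PySem.Str.replace line
        "$Od" (String.ofList (PySem.Chars.zfill (PySem.Int.toChars output) 2)))
        "$Val" (PySem.Int.toStr ((1 : Int) <<< output.toNat)))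
        "$x" (PySem.Int.toStr (18 + output * 48)))
        "$y" (PySem.Int.toStr 54)
      = String.ofList ((PySem.Str.replace (PySem.Str.replace (PySem.Str.replace
          (PySem.Str.replace line
            "$Od" (String.ofList (PySem.Chars.zfill (PySem.Int.toChars output) 2)))
            "$Val" (PySem.Int.toStr ((1 : Int) <<< output.toNat)))
            "$x" (PySem.Int.toStr (18 + output * 48)))
            "$y" (PySem.Int.toStr 54)).toList) := by rw [String.ofList_toList]
    _ = _ := by rw [htl]
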